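-- pv_equiv track=rewrite | github.com/luyangliuable/human_value_machine_learning_app | project/machine_learning/src/extractor.py | check_triggers_multiline_comment
-- ===== SOURCE A (Python) =====
-- def check_triggers_multiline_comment(line: str, multiline_sexp: str, multiline_closing_sexp: str) -> bool:
--     """checks if a particular line triggers the start of a multi-line comment
--
--     Keyword Arguments:
--     line -- the line to examine
--     multiline_sexp -- the sexp that dictates the start of multi-line comment
--     """
--
--     triggers_multiline = False
--     # triggers_closing_multiline = False
--     multiline_sexp_length = len(multiline_sexp)
--     # res = ""
--     # start_of_comment = None
--     for which_line_column in range(len(line)):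
--         sliding_window = ""
--         for which_sexp_column in range(multiline_sexp_length):
--             if which_sexp_column + which_line_column < len(line):
--                 sliding_window += line[which_line_column + which_sexp_column]
--
--         if multiline_sexp != multiline_closing_sexp:
--             if sliding_window == multiline_sexp:
--                 triggers_multiline = not triggers_multiline
--
--             if sliding_window == multiline_closing_sexp:
--                 triggers_multiline = not triggers_multiline
--
--         elif multiline_sexp == multiline_closing_sexp:
--             if sliding_window == multiline_sexp:
--                 triggers_multiline = not triggers_multiline
--
--     return triggers_multiline
-- ===== SOURCE B (Python) =====
-- def check_triggers_multiline_comment(line: str, multiline_sexp: str, multiline_closing_sexp: str) -> bool: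
--     """Count the sliding windows matching either sexp (deduplicated via a set,
--     so equal opening/closing sexps are counted once) and return the parity."""
--     m = len(multiline_sexp)
--     patterns = {multiline_sexp, multiline_closing_sexp}
--     matches = sum(line[i:i + m] in patterns for i in range(len(line)))
--     return matches % 2 == 1
-- ===== Notes on version B (the rewrite author's own statement) =====
-- stated objective: simpler
-- what changed: Replaces the nested character-appending loop and the double-toggle/branch-on-equality logic with one comprehension of slices counted against a set of the two patterns (the set dedup makes the equal-sexp branch disappear), returning the parity of the count.
import Mathlib
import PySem

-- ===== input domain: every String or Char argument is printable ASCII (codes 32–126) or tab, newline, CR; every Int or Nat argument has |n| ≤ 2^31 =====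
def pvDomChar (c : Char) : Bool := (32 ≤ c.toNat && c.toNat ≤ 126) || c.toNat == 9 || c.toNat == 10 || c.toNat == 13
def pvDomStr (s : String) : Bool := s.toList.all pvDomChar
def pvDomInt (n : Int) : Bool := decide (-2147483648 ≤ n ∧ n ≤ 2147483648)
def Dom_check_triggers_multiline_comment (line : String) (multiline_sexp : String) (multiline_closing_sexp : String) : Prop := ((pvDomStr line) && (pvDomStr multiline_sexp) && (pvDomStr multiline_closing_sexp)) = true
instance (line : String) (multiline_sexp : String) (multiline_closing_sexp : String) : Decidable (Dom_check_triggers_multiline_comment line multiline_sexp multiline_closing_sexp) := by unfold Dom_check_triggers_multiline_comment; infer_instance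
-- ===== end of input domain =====

-- B replaces the nested window-building loop and double-toggle logic by counting
-- slices that lie in the set of the two patterns and returning the parity (simpler).


-- ===== PORT A =====
-- literal port of A on List Char; the guarded indexing `line[i+j]` (always in range
-- under the guard) is List.getD, exact there.
def check_triggers_multiline_comment (line : String) (multiline_sexp : String) (multiline_closing_sexp : String) : Bool :=
  let cs := line.toList
  let a := multiline_sexp.toList
  let b := multiline_closing_sexp.toList
  let m := a.length
  (List.range cs.length).foldl (fun triggers i =>
    let sw := (List.range m).foldl
      (fun sw j => if i + j < cs.length then sw ++ [cs.getD (i + j) ' '] else sw) ([] : List Char)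
    if a ≠ b then
      let triggers := if sw = a then !triggers else triggers
      if sw = b then !triggers else triggers
    else
      if sw = a then !triggers else triggers) false

-- ===== PORT B =====
-- literal port of Source B: set of the two patterns, count matching slices, parity.
def check_triggers_multiline_comment_alt (line : String) (multiline_sexp : String) (multiline_closing_sexp : String) : Bool :=
  let cs := line.toList
  let m := multiline_sexp.toList.length
  let patterns : PySem.Set (List Char) :=
    PySem.Set.ofList [multiline_sexp.toList, multiline_closing_sexp.toList]
  let cnt := (List.range cs.length).countP
    (fun (i : Nat) => patterns.contains (PySem.List.slice cs (some (i : Int)) (some ((i : Int) + (m : Int)))))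
  cnt % 2 == 1

-- ===== PRECONDITION & SPEC =====
def Spec_check_triggers_multiline_comment (line : String) (multiline_sexp : String) (multiline_closing_sexp : String) (out : Bool) : Prop := out = check_triggers_multiline_comment_alt line multiline_sexp multiline_closing_sexp
instance (line : String) (multiline_sexp : String) (multiline_closing_sexp : String) (out : Bool) : Decidable (Spec_check_triggers_multiline_comment line multiline_sexp multiline_closing_sexp out) := by unfold Spec_check_triggers_multiline_comment; infer_instance

-- ===== CLAIM (what is proved, stated in full; the proofs are below) =====
def Claim_equal_check_triggers_multiline_comment : Prop := ∀ (line : String) (multiline_sexp : String) (multiline_closing_sexp : String), Dom_check_triggers_multiline_comment line multiline_sexp multiline_closing_sexp → Spec_check_triggers_multiline_comment line multiline_sexp multiline_closing_sexp (check_triggers_multiline_comment line multiline_sexp multiline_closing_sexp)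

-- ===== LEMMAS AND PROOFS =====

-- A's inner loop builds exactly the Python slice line[i:i+m].
theorem ctm_window_eq (cs : List Char) (i m : Nat) (sw0 : List Char) :
    (List.range m).foldl
      (fun sw j => if i + j < cs.length then sw ++ [cs.getD (i + j) ' '] else sw) sw0
    = sw0 ++ (cs.drop i).take m := by
  induction m with
  | zero => simp
  | succ m ih =>
      rw [List.range_succ, List.foldl_append, ih, List.take_add_one]
      simp only [List.foldl_cons, List.foldl_nil]
      by_cases h : i + m < cs.length
      · have hm : m < (cs.drop i).length := by simp [List.length_drop]; omega
        rw [if_pos h]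
        have : (cs.drop i)[m]? = some (cs.drop i)[m] := List.getElem?_eq_getElem hm
        rw [this]
        simp [List.getElem_drop, List.getD_eq_getElem?_getD, List.getElem?_eq_getElem (by omega : i + m < cs.length)]
      · have hm : ¬ m < (cs.drop i).length := by simp [List.length_drop]; omega
        rw [if_neg h, List.getElem?_eq_none (by omega : (cs.drop i).length ≤ m)]
        simp

-- folding a toggle is the parity of the count
theorem foldl_toggle_parity {α : Type} (p : α → Bool) :
    ∀ (l : List α) (b : Bool),
      l.foldl (fun t x => if p x then !t else t) b = (b ^^ decide (l.countP p % 2 = 1)) := by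
  intro l
  induction l with
  | nil => intro b; simp
  | cons x l ih =>
      intro b
      rw [List.foldl_cons, ih, List.countP_cons]
      by_cases h : p x = true
      · simp only [h, if_pos]
        have : (l.countP p + 1) % 2 = 1 ↔ ¬ (l.countP p % 2 = 1) := by omega
        rcases Bool.eq_false_or_eq_true b with hb | hb <;> subst hb <;>
          by_cases hc : l.countP p % 2 = 1 <;> simp_all
      · simp [h]

theorem check_triggers_multiline_comment_spec : Claim_equal_check_triggers_multiline_comment := by
  unfold Claim_equal_check_triggers_multiline_comment
  intro line msexp mclosing _
  unfold Spec_check_triggers_multiline_comment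
  unfold check_triggers_multiline_comment check_triggers_multiline_comment_alt
  dsimp only
  set cs := line.toList with hcs
  set a := msexp.toList with ha
  set b := mclosing.toList with hb
  -- the membership predicate B counts
  set p : Nat → Bool := fun i =>
    (PySem.Set.ofList [a, b]).contains
      (PySem.List.slice cs (some (i : Int)) (some ((i : Int) + (a.length : Int)))) with hp
  have hmem : ∀ w : List Char, (PySem.Set.ofList [a, b]).contains w = (w = a || w = b) := by
    intro w
    have h := PySem.Set.mem_ofList [a, b] w
    by_cases h1 : w = a <;> by_cases h2 : w = b <;> simp [h, h1, h2]
  -- A's fold body is the toggle by p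
  have hbody : (fun (triggers : Bool) (i : Nat) =>
      if a ≠ b then
        if ((List.range a.length).foldl
              (fun sw j => if i + j < cs.length then sw ++ [cs.getD (i + j) ' '] else sw)
              ([] : List Char)) = b then
          !(if ((List.range a.length).foldl
              (fun sw j => if i + j < cs.length then sw ++ [cs.getD (i + j) ' '] else sw)
              ([] : List Char)) = a then !triggers else triggers)
        else (if ((List.range a.length).foldl
              (fun sw j => if i + j < cs.length then sw ++ [cs.getD (i + j) ' '] else sw)
              ([] : List Char)) = a then !triggers else triggers)
      else if ((List.range a.length).foldl
              (fun sw j => if i + j < cs.length then sw ++ [cs.getD (i + j) ' '] else sw)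
              ([] : List Char)) = a then !triggers else triggers)
      = (fun (t : Bool) (i : Nat) => if p i then !t else t) := by
    funext t i
    rw [hp]
    simp only [ctm_window_eq cs i a.length, List.nil_append,
      PySem.List.slice_natCast_add cs i a.length, hmem]
    by_cases hab : a = b
    · by_cases h1 : (cs.drop i).take a.length = b <;> simp [hab]
    · by_cases h1 : (cs.drop i).take a.length = a <;>
        by_cases h2 : (cs.drop i).take a.length = b <;> simp_all
  rw [hbody, foldl_toggle_parity p (List.range cs.length) false]
  cases h : (List.countP p (List.range cs.length) % 2 == 1) <;> simp_all
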